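-- pv_equiv track=rewrite | github.com/facebookresearch/BELA | bela/utils/utils.py | get_entity_spans_pre_processing
-- ===== SOURCE A (Python) =====
-- def get_entity_spans_pre_processing(sentences):
--     return [
--         (
--             " {} ".format(sent)
--             .replace("\xa0", " ")
--             .replace("{", "(")
--             .replace("}", ")")
--             .replace("[", "(")
--             .replace("]", ")")
--         )
--         for sent in sentences
--     ]
-- ===== SOURCE B (Python) =====
-- _REPL = {"\xa0": " ", "{": "(", "}": ")", "[": "(", "]": ")"}
--
--
-- def get_entity_spans_pre_processing(sentences):
--     # Single explicit pass per sentence with an accumulator (pad + substitute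
--     # character by character), instead of format + five whole-string replace scans.
--     out = []
--     for sent in sentences:
--         buf = [" "]
--         for ch in sent:
--             buf.append(_REPL.get(ch, ch))
--         buf.append(" ")
--         out.append("".join(buf))
--     return out
-- ===== Notes on version B (the rewrite author's own statement) =====
-- stated objective: alternative
-- what changed: Replaces format-padding plus five sequential whole-string .replace scans with one explicit character-by-character loop that pads and substitutes via a dict lookup into an accumulated buffer joined once.
import Mathlib
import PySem

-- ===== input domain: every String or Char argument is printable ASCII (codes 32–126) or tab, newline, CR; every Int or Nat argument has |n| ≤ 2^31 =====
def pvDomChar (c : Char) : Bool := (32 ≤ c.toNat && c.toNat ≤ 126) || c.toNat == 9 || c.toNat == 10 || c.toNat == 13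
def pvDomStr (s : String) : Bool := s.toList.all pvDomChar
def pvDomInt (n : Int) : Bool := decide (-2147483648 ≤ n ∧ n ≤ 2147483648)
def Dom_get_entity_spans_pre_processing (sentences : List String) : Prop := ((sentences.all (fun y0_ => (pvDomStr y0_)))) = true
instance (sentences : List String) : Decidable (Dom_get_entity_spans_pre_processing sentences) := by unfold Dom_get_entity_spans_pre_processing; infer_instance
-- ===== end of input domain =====

-- B replaces format + five whole-string .replace scans with one explicit per-character
-- accumulator loop (pad, dict-lookup substitution, join once); same output.

-- ===== PORT A =====
-- " {} ".format(sent) followed by five chained .replace calls, in source order.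
def get_entity_spans_pre_processing (sentences : List String) : List String :=
  sentences.map (fun sent =>
    PySem.Str.replace
      (PySem.Str.replace
        (PySem.Str.replace
          (PySem.Str.replace
            (PySem.Str.replace (String.ofList (' ' :: sent.toList ++ [' '])) "\u00A0" " ")
            "{" "(")
          "}" ")")
        "[" "(")
      "]" ")")

-- ===== PORT B =====
-- Source B's module-level substitution dict _REPL
def pvRepl : PySem.Dict Char Char :=
  PySem.Dict.ofList [('\u00A0', ' '), ('{', '('), ('}', ')'), ('[', '('), (']', ')')]

-- explicit loops of Source B: outer accumulator over sentences, inner accumulator over chars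
def get_entity_spans_pre_processing_alt (sentences : List String) : List String :=
  sentences.foldl
    (fun out sent =>
      out ++ [String.ofList
        ((sent.toList.foldl (fun buf ch => buf ++ [PySem.Dict.getD pvRepl ch ch]) [' ']) ++ [' '])])
    []

-- ===== PRECONDITION & SPEC =====
def Spec_get_entity_spans_pre_processing (sentences : List String) (out : List String) : Prop := out = get_entity_spans_pre_processing_alt sentences
instance (sentences : List String) (out : List String) : Decidable (Spec_get_entity_spans_pre_processing sentences out) := by unfold Spec_get_entity_spans_pre_processing; infer_instance

-- ===== CLAIM (what is proved, stated in full; the proofs are below) =====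
def Claim_equal_get_entity_spans_pre_processing : Prop := ∀ (sentences : List String), Dom_get_entity_spans_pre_processing sentences → Spec_get_entity_spans_pre_processing sentences (get_entity_spans_pre_processing sentences)

-- ===== LEMMAS AND PROOFS =====

-- the pointwise substitution both programs implement
def pvTr (c : Char) : Char :=
  if c = '\u00A0' then ' '
  else if c = '{' then '('
  else if c = '}' then ')'
  else if c = '[' then '('
  else if c = ']' then ')'
  else c

-- single-char replace's worker is a map over the remaining characters (fuel ≥ length)
theorem replace_go_single (a b : Char) (l acc : List Char) (fuel : Nat) (h : l.length ≤ fuel) :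
    PySem.Chars.replace.go [a] [b] fuel l acc
      = acc.reverse ++ l.map (fun c => if c = a then b else c) := by
  induction l generalizing fuel acc with
  | nil =>
      cases fuel <;> simp [PySem.Chars.replace.go]
  | cons c t ih =>
      cases fuel with
      | zero => simp at h
      | succ fuel =>
          simp only [List.length_cons, Nat.succ_le_succ_iff] at h
          by_cases hc : c = a
          · subst hc
            simp only [PySem.Chars.replace.go, List.isPrefixOf, BEq.rfl, Bool.true_and,
              List.isPrefixOf_nil_left, if_true, List.length_singleton, List.drop_succ_cons,
              List.drop_zero, List.reverse_cons, List.reverse_nil, List.nil_append,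
              List.singleton_append]
            rw [ih (b :: acc) fuel h]
            simp
          · have hpre : [a].isPrefixOf (c :: t) = false := by
              simp [List.isPrefixOf]
              exact fun he => (hc he.symm).elim
            simp only [PySem.Chars.replace.go, hpre, Bool.false_eq_true, if_false]
            rw [ih (c :: acc) fuel h]
            simp [hc]

-- single-char replace = map of a pointwise substitution
theorem replace_single (a b : Char) (l : List Char) :
    PySem.Chars.replace l [a] [b] = l.map (fun c => if c = a then b else c) := by
  simp [PySem.Chars.replace, replace_go_single a b l [] l.length (le_refl _)]

theorem str_replace_single (a b : Char) (l : List Char) :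
    PySem.Str.replace (String.ofList l) (String.ofList [a]) (String.ofList [b])
      = String.ofList (l.map (fun c => if c = a then b else c)) := by
  simp [PySem.Str.replace, replace_single]

-- the five substitutions compose to the pointwise substitution, on any character
theorem tr_compose (c : Char) :
    (fun x => if x = ']' then ')' else x)
      ((fun x => if x = '[' then '(' else x)
        ((fun x => if x = '}' then ')' else x)
          ((fun x => if x = '{' then '(' else x)
            ((fun x => if x = '\u00A0' then ' ' else x) c)))) = pvTr c := by
  unfold pvTr
  by_cases h1 : c = '\u00A0'
  · subst h1; decide
  · by_cases h2 : c = '{'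
    · subst h2; decide
    · by_cases h3 : c = '}'
      · subst h3; decide
      · by_cases h4 : c = '['
        · subst h4; decide
        · by_cases h5 : c = ']'
          · subst h5; decide
          · simp [h1, h2, h3, h4, h5]

-- A's per-sentence value is the pointwise substitution of the padded characters
theorem one_sentence_A (sent : String) :
    PySem.Str.replace
      (PySem.Str.replace
        (PySem.Str.replace
          (PySem.Str.replace
            (PySem.Str.replace (String.ofList (' ' :: sent.toList ++ [' '])) "\u00A0" " ")
            "{" "(")
          "}" ")")
        "[" "(")
      "]" ")"
      = String.ofList ((' ' :: sent.toList ++ [' ']).map pvTr) := by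
  have e1 := str_replace_single '\u00A0' ' ' (' ' :: sent.toList ++ [' '])
  rw [show ("\u00A0" : String) = String.ofList ['\u00A0'] from rfl,
      show (" " : String) = String.ofList [' '] from rfl,
      show ("{" : String) = String.ofList ['{'] from rfl,
      show ("(" : String) = String.ofList ['('] from rfl,
      show ("}" : String) = String.ofList ['}'] from rfl,
      show (")" : String) = String.ofList [')'] from rfl,
      show ("[" : String) = String.ofList ['['] from rfl,
      show ("]" : String) = String.ofList [']'] from rfl] at *
  rw [e1, str_replace_single, str_replace_single, str_replace_single, str_replace_single]
  simp only [List.map_map, Function.comp_def]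
  exact congrArg String.ofList (List.map_congr_left (fun c _ => tr_compose c))

-- the dict lookup of Source B is the same pointwise substitution
theorem getD_repl (c : Char) : PySem.Dict.getD pvRepl c c = pvTr c := by
  unfold pvTr
  by_cases h1 : c = '\u00A0'
  · subst h1; decide
  · by_cases h2 : c = '{'
    · subst h2; decide
    · by_cases h3 : c = '}'
      · subst h3; decide
      · by_cases h4 : c = '['
        · subst h4; decide
        · by_cases h5 : c = ']'
          · subst h5; decide
          · have hmk : pvRepl = PySem.Dict.mk
                [('\u00A0', ' '), ('{', '('), ('}', ')'), ('[', '('), (']', ')')] := by decide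
            simp only [h1, h2, h3, h4, h5, if_false]
            simp [hmk, PySem.Dict.getD, PySem.Dict.get?_mk_cons,
              Ne.symm h1, Ne.symm h2, Ne.symm h3, Ne.symm h4, Ne.symm h5,
              PySem.Dict.get?]

-- the inner accumulator loop is a map
theorem inner_loop (l acc : List Char) :
    l.foldl (fun buf ch => buf ++ [PySem.Dict.getD pvRepl ch ch]) acc = acc ++ l.map pvTr := by
  induction l generalizing acc with
  | nil => simp
  | cons c t ih => rw [List.foldl_cons, ih]; simp [getD_repl]

-- the outer accumulator loop is a map
theorem outer_loop (g : String → String) (l : List String) (acc : List String) :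
    l.foldl (fun out s => out ++ [g s]) acc = acc ++ l.map g := by
  induction l generalizing acc with
  | nil => simp
  | cons s t ih => rw [List.foldl_cons, ih]; simp

theorem alt_eq_map (sentences : List String) :
    get_entity_spans_pre_processing_alt sentences
      = sentences.map (fun sent => String.ofList ((' ' :: sent.toList ++ [' ']).map pvTr)) := by
  unfold get_entity_spans_pre_processing_alt
  rw [outer_loop]
  simp only [List.nil_append]
  refine List.map_congr_left (fun sent _ => ?_)
  rw [inner_loop]
  have hsp : pvTr ' ' = ' ' := by decide
  simp [hsp]

-- ===== VERDICT (by name: the statement is the Claim_ definition above) =====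
theorem get_entity_spans_pre_processing_spec : Claim_equal_get_entity_spans_pre_processing := by
  intro sentences _
  unfold Spec_get_entity_spans_pre_processing
  rw [alt_eq_map]
  unfold get_entity_spans_pre_processing
  exact List.map_congr_left (fun sent _ => one_sentence_A sent)
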